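-- pv_equiv track=rewrite | github.com/KeenTools/keentools-blender | keentools/tracker/tracking_blendshapes.py | check_nearest_frame_sequence
-- ===== SOURCE A (Python) =====
-- from typing import Any, Set, Tuple, List, Optional
--
-- def check_nearest_frame_sequence(frames: List, key_blocks_count: int) -> bool:
--     actual_frames = reversed([x for x in frames if x != -1])
--     last_index = key_blocks_count - 1
--     for frame in actual_frames:
--         if frame != last_index:
--             return False
--         last_index -= 1
--     return True
-- ===== SOURCE B (Python) =====
-- from typing import Any, Set, Tuple, List, Optional
--
-- def check_nearest_frame_sequence(frames: List, key_blocks_count: int) -> bool: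
--     # Single forward pass: every non-(-1) frame must be the successor of the
--     # previous one, and the run must end exactly at key_blocks_count - 1.
--     prev = None
--     for x in frames:
--         if x == -1:
--             continue
--         if prev is not None and x != prev + 1:
--             return False
--         prev = x
--     return prev is None or prev == key_blocks_count - 1
-- ===== Notes on version B (the rewrite author's own statement) =====
-- stated objective: alternative
-- what changed: Instead of building the filtered list, reversing it and comparing each element to a counter decremented from key_blocks_count-1, B scans frames forward in a single loop with no intermediate lists, checking that each non-(-1) frame is the successor of the previous one, and only at the end anchors the last frame against key_blocks_count-1.
import Mathlib
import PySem

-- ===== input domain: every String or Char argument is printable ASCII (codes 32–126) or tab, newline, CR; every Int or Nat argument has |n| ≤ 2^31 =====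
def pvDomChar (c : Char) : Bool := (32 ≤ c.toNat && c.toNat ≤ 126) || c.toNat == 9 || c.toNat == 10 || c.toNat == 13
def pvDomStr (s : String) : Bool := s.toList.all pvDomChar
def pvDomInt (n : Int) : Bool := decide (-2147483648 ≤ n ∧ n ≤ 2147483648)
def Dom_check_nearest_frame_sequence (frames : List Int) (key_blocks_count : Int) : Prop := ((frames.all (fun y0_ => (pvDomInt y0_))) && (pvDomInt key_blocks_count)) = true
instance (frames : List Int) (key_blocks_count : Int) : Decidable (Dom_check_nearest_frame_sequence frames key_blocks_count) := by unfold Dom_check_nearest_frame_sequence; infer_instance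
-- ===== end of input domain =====

-- B scans frames forward once without reversing: each non-(-1) frame must be the
-- successor of the previous one, and only the final frame is anchored against
-- key_blocks_count - 1 (objective: alternative single forward pass).

-- ===== PORT A =====
-- the 'for frame in actual_frames' loop with early 'return False' and the decrementing last_index
def pvLoopA : List Int → Int → Bool
  | [], _ => true
  | frame :: rest, last_index =>
      if frame ≠ last_index then false else pvLoopA rest (last_index - 1)

def check_nearest_frame_sequence (frames : List Int) (key_blocks_count : Int) : Bool :=
  pvLoopA ((frames.filter (fun x => x ≠ -1)).reverse) (key_blocks_count - 1)

-- ===== PORT B =====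
-- the 'for x in frames' loop: prev : Option Int; result none = early 'return False',
-- some prev = the loop finished with that prev
def pvLoopB : List Int → Option Int → Option (Option Int)
  | [], prev => some prev
  | x :: rest, prev =>
      if x = -1 then pvLoopB rest prev
      else match prev with
        | none => pvLoopB rest (some x)
        | some p => if x ≠ p + 1 then none else pvLoopB rest (some x)

def check_nearest_frame_sequence_alt (frames : List Int) (key_blocks_count : Int) : Bool :=
  match pvLoopB frames none with
  | none => false                                  -- early 'return False'
  | some none => true                              -- prev is None
  | some (some p) => p == key_blocks_count - 1     -- prev == key_blocks_count - 1

-- ===== PRECONDITION & SPEC =====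
def Spec_check_nearest_frame_sequence (frames : List Int) (key_blocks_count : Int) (out : Bool) : Prop := out = check_nearest_frame_sequence_alt frames key_blocks_count
instance (frames : List Int) (key_blocks_count : Int) (out : Bool) : Decidable (Spec_check_nearest_frame_sequence frames key_blocks_count out) := by unfold Spec_check_nearest_frame_sequence; infer_instance

-- ===== CLAIM (what is proved, stated in full; the proofs are below) =====
def Claim_equal_check_nearest_frame_sequence : Prop := ∀ (frames : List Int) (key_blocks_count : Int), Dom_check_nearest_frame_sequence frames key_blocks_count → Spec_check_nearest_frame_sequence frames key_blocks_count (check_nearest_frame_sequence frames key_blocks_count)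

-- ===== LEMMAS AND PROOFS =====
-- B's loop on the filtered list: skipping -1's is the same as filtering first
lemma pvLoopB_filter (xs : List Int) (prev : Option Int) :
    pvLoopB xs prev = pvLoopB (xs.filter (fun x => x ≠ -1)) prev := by
  induction xs generalizing prev with
  | nil => rfl
  | cons x rest ih =>
      by_cases h : x = -1
      · simp [pvLoopB, h, ih]
      · cases prev <;> simp [pvLoopB, h, ih]

-- B's loop seeded with 'some p' succeeds iff the list is the consecutive run starting at p+1
lemma pvLoopB_some (l : List Int) (p : Int) (hl : (-1 : Int) ∉ l) :
    pvLoopB l (some p)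
      = if l = PySem.List.pyRange (p + 1) (p + 1 + l.length) 1
        then some (some (p + l.length)) else none := by
  induction l generalizing p with
  | nil => simp [pvLoopB, PySem.List.pyRange_one_eq_nil]
  | cons x rest ih =>
      have hx : x ≠ -1 := by rintro rfl; exact hl (List.mem_cons_self ..)
      have hrest : (-1 : Int) ∉ rest := fun h => hl (List.mem_cons_of_mem _ h)
      have hlt : p + 1 < p + 1 + (((x :: rest).length : Nat) : Int) := by
        have : (0:Int) < ((x :: rest).length : Int) := by exact_mod_cast Nat.succ_pos rest.length
        omega
      rw [PySem.List.pyRange_one_cons hlt]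
      by_cases h : x = p + 1
      · subst h
        rw [show pvLoopB ((p + 1) :: rest) (some p) = pvLoopB rest (some (p + 1)) by
              simp [pvLoopB, hx], ih _ hrest]
        simp only [List.length_cons]
        rw [show (p:Int) + 1 + ((rest.length + 1 : Nat) : Int) = p + 1 + 1 + (rest.length : Int) by
              push_cast; ring]
        rw [show (p:Int) + ((rest.length + 1 : Nat) : Int) = p + 1 + (rest.length : Int) by
              push_cast; ring]
        simp only [List.cons.injEq, true_and]
      · rw [show pvLoopB (x :: rest) (some p) = none by simp [pvLoopB, hx, h]]
        rw [if_neg]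
        intro hc
        exact h (List.cons_eq_cons.mp hc).1

-- A's loop is 'the list equals the countdown range'
lemma pvLoopA_eq (l : List Int) (last : Int) :
    pvLoopA l last = decide (l = PySem.List.pyRange last (last - l.length) (-1)) := by
  induction l generalizing last with
  | nil => simp [pvLoopA, PySem.List.pyRange_neg_one_eq_nil]
  | cons f rest ih =>
      have hb : last - (((f :: rest).length : Nat) : Int) < last := by
        have : (0:Int) < ((f :: rest).length : Int) := by exact_mod_cast Nat.succ_pos rest.length
        omega
      have harg : last - (((f :: rest).length : Nat) : Int)
          = (last - 1) - ((rest.length : Nat) : Int) := by simp only [List.length_cons]; push_cast; ring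
      rw [PySem.List.pyRange_neg_one_cons hb, harg]
      by_cases h : f = last
      · subst h
        simp [pvLoopA, ih]
      · simp [pvLoopA, h]

lemma pvRange_ext {a b c d : Int} (h1 : a = c) (h2 : b = d) :
    PySem.List.pyRange a b 1 = PySem.List.pyRange c d 1 := by rw [h1, h2]

-- B's whole body on a clean list equals 'the list is the run ending at kbc - 1'
lemma pvAltB_eq (l : List Int) (kbc : Int) (hl : (-1 : Int) ∉ l) :
    (match pvLoopB l none with
      | none => false
      | some none => true
      | some (some p) => p == kbc - 1)
      = decide (l = PySem.List.pyRange (kbc - l.length) kbc 1) := by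
  cases l with
  | nil => simp [pvLoopB, PySem.List.pyRange_one_eq_nil]
  | cons x rest =>
      have hx : x ≠ -1 := by rintro rfl; exact hl (List.mem_cons_self ..)
      have hrest : (-1 : Int) ∉ rest := fun h => hl (List.mem_cons_of_mem _ h)
      have hlt : kbc - (((x :: rest).length : Nat) : Int) < kbc := by
        have : (0:Int) < ((x :: rest).length : Int) := by exact_mod_cast Nat.succ_pos rest.length
        omega
      rw [show pvLoopB (x :: rest) none = pvLoopB rest (some x) by simp [pvLoopB, hx]]
      rw [pvLoopB_some rest x hrest, PySem.List.pyRange_one_cons hlt]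
      by_cases hr : rest = PySem.List.pyRange (x + 1) (x + 1 + rest.length) 1
      · rw [if_pos hr]
        by_cases hk : x + (rest.length : Int) = kbc - 1
        · rw [show (decide ((x :: rest) = (kbc - ((x :: rest).length : Int)) ::
                PySem.List.pyRange (kbc - ((x :: rest).length : Int) + 1) kbc 1)) = true by
              rw [decide_eq_true_iff]
              refine List.cons_eq_cons.mpr ⟨?_, hr.trans (pvRange_ext ?_ ?_)⟩
              · simp only [List.length_cons]; push_cast; omega
              · simp only [List.length_cons]; push_cast; omega
              · omega]
          simpa using hk
        · rw [show (decide ((x :: rest) = (kbc - ((x :: rest).length : Int)) ::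
                PySem.List.pyRange (kbc - ((x :: rest).length : Int) + 1) kbc 1)) = false by
              rw [decide_eq_false_iff_not]
              intro hc
              have hx' := (List.cons_eq_cons.mp hc).1
              apply hk
              simp only [List.length_cons] at hx'; push_cast at hx'; omega]
          simpa using hk
      · rw [if_neg hr]
        rw [show (decide ((x :: rest) = (kbc - ((x :: rest).length : Int)) ::
              PySem.List.pyRange (kbc - ((x :: rest).length : Int) + 1) kbc 1)) = false by
            rw [decide_eq_false_iff_not]
            intro hc
            obtain ⟨hx', hrest'⟩ := List.cons_eq_cons.mp hc
            simp only [List.length_cons] at hx'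
            push_cast at hx'
            exact hr (hrest'.trans (pvRange_ext
              (by simp only [List.length_cons]; push_cast; omega)
              (by omega)))]

-- ===== VERDICT (by name: the statement is the Claim_ definition above) =====
theorem check_nearest_frame_sequence_spec : Claim_equal_check_nearest_frame_sequence := by
  unfold Claim_equal_check_nearest_frame_sequence
  intro frames kbc _
  unfold Spec_check_nearest_frame_sequence check_nearest_frame_sequence check_nearest_frame_sequence_alt
  rw [pvLoopB_filter]
  set l := frames.filter (fun x => x ≠ -1) with hl
  have hnotmem : (-1 : Int) ∉ l := by
    intro h
    have := List.of_mem_filter h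
    simp at this
  rw [pvLoopA_eq, pvAltB_eq l kbc hnotmem]
  have h1 : PySem.List.pyRange (kbc - 1) (kbc - 1 - (l.reverse.length : Int)) (-1)
      = (PySem.List.pyRange (kbc - (l.length : Int)) kbc 1).reverse := by
    rw [PySem.List.pyRange_neg_one_eq_reverse]
    congr 2 <;> simp <;> omega
  rw [h1]
  simp [List.reverse_inj]
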